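-- pv_equiv track=rewrite | github.com/DDDEthtest/mashi | bot/message_module.py | _generate_assets_links
-- ===== SOURCE A (Python) =====
-- def _generate_assets_links(assets: dict) -> str:
--     assets = {k: v.replace("ipfs://", "https://ipfs.io/ipfs/") if v else v for k, v in assets.items()}
--     assets_list = [
--         f"[{key}]({value})" for key, value in assets.items() if value and key != "composite"
--     ]
--
--     # split by 3 per row
--     assets_links = "\n".join(
--         " · ".join(assets_list[i:i + 3])
--         for i in range(0, len(assets_list), 3)
--     )
--     return assets_links
-- ===== SOURCE B (Python) =====
-- def _generate_assets_links(assets: dict) -> str: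
--     out = ""
--     count = 0
--     for key, value in assets.items():
--         if value:
--             value = value.replace("ipfs://", "https://ipfs.io/ipfs/")
--         if not value or key == "composite":
--             continue
--         if count:
--             out += "\n" if count % 3 == 0 else " · "
--         out += f"[{key}]({value})"
--         count += 1
--     return out
-- ===== Notes on version B (the rewrite author's own statement) =====
-- stated objective: simpler
-- what changed: B fuses A's three-stage pipeline (dict-comprehension rewrite, link list comprehension, range/slice chunk-and-double-join) into a single pass over the items that emits each link with a count-modulo-3 separator into a string accumulator.
import Mathlib
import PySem

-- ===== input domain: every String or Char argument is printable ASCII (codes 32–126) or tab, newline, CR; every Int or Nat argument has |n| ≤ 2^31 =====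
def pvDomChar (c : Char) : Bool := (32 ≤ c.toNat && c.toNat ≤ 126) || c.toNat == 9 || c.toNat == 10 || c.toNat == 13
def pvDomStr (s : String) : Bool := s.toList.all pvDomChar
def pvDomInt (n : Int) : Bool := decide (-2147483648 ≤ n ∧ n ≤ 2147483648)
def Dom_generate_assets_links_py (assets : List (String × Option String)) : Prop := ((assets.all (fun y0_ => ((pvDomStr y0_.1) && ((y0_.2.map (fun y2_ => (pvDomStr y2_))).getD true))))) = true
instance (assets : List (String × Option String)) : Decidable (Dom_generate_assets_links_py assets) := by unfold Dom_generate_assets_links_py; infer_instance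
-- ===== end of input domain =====

-- B fuses A's rewrite/filter/chunk-and-join pipeline into one pass with a count-modulo-3 separator; objective: simpler.

-- ===== PORT A =====
-- Python-truthiness rewrite 'v.replace("ipfs://", …) if v else v' of one value (exact: None and "" are falsy)
def pvRewrite (v : Option String) : Option String :=
  match v with
  | some s => if s ≠ "" then some (PySem.Str.replace s "ipfs://" "https://ipfs.io/ipfs/") else some s
  | none => none

def generate_assets_links_py (assets : List (String × Option String)) : String :=
  -- the dict comprehension: the source is a Python dict, so its keys are unique (Pre_) and the rebuild is a map over the items
  let assets2 := assets.map (fun kv => (kv.1, pvRewrite kv.2))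
  -- 'if value and key != "composite"': value truthy iff it is neither None nor "" (getD "" sends both to "")
  let assetsList := (assets2.filter (fun kv => (kv.2.getD "" != "") && (kv.1 != "composite"))).map
      (fun kv => "[" ++ kv.1 ++ "](" ++ kv.2.getD "" ++ ")")
  PySem.Str.join "\n" ((PySem.List.pyRange 0 (assetsList.length : Int) 3).map
      (fun i => PySem.Str.join " · " (PySem.List.slice assetsList (some i) (some (i + 3)))))

-- ===== PORT B =====
def generate_assets_links_py_alt (assets : List (String × Option String)) : String :=
  (assets.foldl (fun (st : String × Nat) kv =>
      let value := pvRewrite kv.2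
      match value with
      | none => st
      | some v =>
        if v = "" ∨ kv.1 = "composite" then st
        else
          let out := if st.2 ≠ 0 then st.1 ++ (if st.2 % 3 = 0 then "\n" else " · ") else st.1
          (out ++ "[" ++ kv.1 ++ "](" ++ v ++ ")", st.2 + 1)) ("", 0)).1

-- ===== PRECONDITION & SPEC =====
-- Pre_ excludes association lists with duplicate keys: the Python argument is a dict, whose keys are
-- necessarily distinct, so such lists do not denote any input A can receive.
def Pre_generate_assets_links_py (assets : List (String × Option String)) : Prop :=
  (assets.map (·.1)).Nodup

instance (assets : List (String × Option String)) : Decidable (Pre_generate_assets_links_py assets) := by unfold Pre_generate_assets_links_py; infer_instance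

def pvWitness_generate_assets_links_py : (List (String × Option String)) :=
  [("a", some "ipfs://x"), ("composite", some "y"), ("b", none), ("c", some "z"), ("d", some "w"), ("e", some "u")]

def Spec_generate_assets_links_py (assets : List (String × Option String)) (out : String) : Prop := out = generate_assets_links_py_alt assets
instance (assets : List (String × Option String)) (out : String) : Decidable (Spec_generate_assets_links_py assets out) := by unfold Spec_generate_assets_links_py; infer_instance

-- ===== CLAIM (what is proved, stated in full; the proofs are below) =====
def Claim_equal_generate_assets_links_py : Prop := ∀ (assets : List (String × Option String)), Dom_generate_assets_links_py assets → Pre_generate_assets_links_py assets → Spec_generate_assets_links_py assets (generate_assets_links_py assets)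

-- ===== LEMMAS AND PROOFS =====

-- the list of formatted links that A builds and that B emits one by one
def pvLinks (assets : List (String × Option String)) : List String :=
  ((assets.map (fun kv => (kv.1, pvRewrite kv.2))).filter
      (fun kv => (kv.2.getD "" != "") && (kv.1 != "composite"))).map
    (fun kv => "[" ++ kv.1 ++ "](" ++ kv.2.getD "" ++ ")")

def pvSep (c : Nat) : String := if c % 3 = 0 then "\n" else " · "

def pvTail : Nat → List String → String
  | _, [] => ""
  | c, x :: xs => (if c ≠ 0 then pvSep c else "") ++ x ++ pvTail (c + 1) xs

def pvCnt (n : Nat) : Nat := (n + 2) / 3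

def pvRender (L : List String) : String :=
  PySem.Str.join "\n" ((List.range (pvCnt L.length)).map
    (fun k => PySem.Str.join " · " ((L.drop (3 * k)).take 3)))

-- String-level join facts (derived from the Chars-level lemmas)
lemma str_join_nil (sep : String) : PySem.Str.join sep [] = "" := by
  apply String.toList_inj.mp
  simp [PySem.Str.toList_join, PySem.Chars.join_nil]

lemma str_join_singleton (sep p : String) : PySem.Str.join sep [p] = p := by
  apply String.toList_inj.mp
  simp [PySem.Str.toList_join, PySem.Chars.join_singleton]

lemma str_join_cons_cons (sep p q : String) (rest : List String) :
    PySem.Str.join sep (p :: q :: rest) = p ++ sep ++ PySem.Str.join sep (q :: rest) := by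
  apply String.toList_inj.mp
  simp [PySem.Str.toList_join, PySem.Chars.join_cons_cons]

lemma pvSep_add_three (c : Nat) : pvSep (c + 3) = pvSep c := by
  simp [pvSep, Nat.add_mod_right]

lemma pvTail_add_three (L : List String) : ∀ c, 0 < c → pvTail (c + 3) L = pvTail c L := by
  induction L with
  | nil => intro c _; rfl
  | cons x xs ih =>
    intro c hc
    simp only [pvTail, pvSep_add_three]
    have h1 : c + 3 ≠ 0 := by omega
    have h2 : c ≠ 0 := by omega
    rw [if_pos h1, if_pos h2]
    have : c + 3 + 1 = (c + 1) + 3 := by omega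
    rw [this, ih (c + 1) (by omega)]

lemma pvTail_zero (L : List String) (h : L ≠ []) :
    pvTail 0 L = PySem.Str.join " · " (L.take 3) ++
      (if L.drop 3 = [] then "" else "\n" ++ pvTail 0 (L.drop 3)) := by
  match L with
  | [a] =>
    simp only [pvTail, List.take, List.drop, str_join_singleton]
    apply String.toList_inj.mp
    simp
  | [a, b] =>
    simp only [pvTail, List.take, List.drop, str_join_singleton, str_join_cons_cons]
    apply String.toList_inj.mp
    simp [pvSep]
  | [a, b, c] =>
    simp only [pvTail, List.take, List.drop, str_join_singleton, str_join_cons_cons]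
    apply String.toList_inj.mp
    simp [pvSep]
  | a :: b :: c :: d :: rest =>
    simp only [pvTail, List.take, List.drop, if_neg (by simp : ¬(d :: rest = [])),
      str_join_singleton, str_join_cons_cons]
    rw [show (0 + 1 + 1 + 1 + 1 : Nat) = 1 + 3 from rfl, pvTail_add_three rest 1 (by omega)]
    apply String.toList_inj.mp
    simp [pvSep]

lemma pvRender_nil : pvRender [] = "" := by
  simp [pvRender, pvCnt, str_join_nil]

lemma pvRender_step (L : List String) (h : L ≠ []) :
    pvRender L = PySem.Str.join " · " (L.take 3) ++
      (if L.drop 3 = [] then "" else "\n" ++ pvRender (L.drop 3)) := by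
  have hn : 1 ≤ L.length := by
    cases L with
    | nil => exact absurd rfl h
    | cons a t => simp
  have hc : pvCnt L.length = pvCnt (L.length - 3) + 1 := by unfold pvCnt; omega
  have hdl : (L.drop 3).length = L.length - 3 := by simp
  unfold pvRender
  rw [hc, List.range_succ_eq_map, List.map_cons, List.map_map]
  have htail : (List.range (pvCnt (L.length - 3))).map
      ((fun k => PySem.Str.join " · " ((L.drop (3 * k)).take 3)) ∘ Nat.succ)
      = (List.range (pvCnt ((L.drop 3).length))).map
        (fun k => PySem.Str.join " · " (((L.drop 3).drop (3 * k)).take 3)) := by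
    rw [hdl]
    apply List.map_congr_left
    intro k _
    show PySem.Str.join " · " ((L.drop (3 * Nat.succ k)).take 3)
      = PySem.Str.join " · " (((L.drop 3).drop (3 * k)).take 3)
    congr 1
    rw [List.drop_drop]
    congr 2
    omega
  rw [htail]
  simp only [List.drop_zero, Nat.mul_zero]
  by_cases hd : L.drop 3 = []
  · have hz : pvCnt ((L.drop 3).length) = 0 := by
      rw [hd]; rfl
    rw [hz, if_pos hd]
    simp only [List.range_zero, List.map_nil, str_join_singleton]
    apply String.toList_inj.mp
    simp
  · have hz : 1 ≤ pvCnt ((L.drop 3).length) := by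
      have hne : (L.drop 3).length ≠ 0 := fun hx => hd (List.eq_nil_of_length_eq_zero hx)
      unfold pvCnt; omega
    rw [if_neg hd]
    have hlen : ((List.range (pvCnt ((L.drop 3).length))).map
        (fun k => PySem.Str.join " · " (((L.drop 3).drop (3 * k)).take 3))).length
        = pvCnt ((L.drop 3).length) := by simp
    obtain ⟨t0, ts, hr⟩ := List.exists_cons_of_ne_nil
      (fun hx => by rw [hx] at hlen; simp only [List.length_nil] at hlen; omega :
        (List.range (pvCnt ((L.drop 3).length))).map
          (fun k => PySem.Str.join " · " (((L.drop 3).drop (3 * k)).take 3)) ≠ [])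
    rw [hr, str_join_cons_cons]
    apply String.toList_inj.mp
    simp

lemma pvRender_eq_pvTail (L : List String) : pvRender L = pvTail 0 L := by
  by_cases h : L = []
  · subst h; simp [pvRender_nil, pvTail]
  · rw [pvRender_step L h, pvTail_zero L h]
    by_cases hd : L.drop 3 = []
    · rw [if_pos hd, if_pos hd]
    · rw [if_neg hd, if_neg hd, pvRender_eq_pvTail (L.drop 3)]
termination_by L.length
decreasing_by
  have : L.length ≠ 0 := by simpa [List.length_eq_zero_iff] using h
  simp only [List.length_drop]; omega

-- A's pyRange/slice chunking is pvRender
lemma pyRange_three (n : Nat) :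
    PySem.List.pyRange 0 (n : Int) 3 = (List.range (pvCnt n)).map (fun (k : Nat) => (3 * (k : Int) : Int)) := by
  rw [PySem.List.pyRange_of_pos 0 n (by omega)]
  have hcnt : (if (0 : Int) < (n : Int) then (((n : Int) - 0 + 3 - 1) / 3).toNat else 0) = pvCnt n := by
    unfold pvCnt
    by_cases h0 : (0 : Int) < (n : Int)
    · rw [if_pos h0]; omega
    · rw [if_neg h0]; omega
  rw [hcnt]
  apply List.map_congr_left
  intro k _
  ring

lemma portA_eq_pvRender (assets : List (String × Option String)) :
    generate_assets_links_py assets = pvRender (pvLinks assets) := by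
  show PySem.Str.join "\n" ((PySem.List.pyRange 0 ((pvLinks assets).length : Int) 3).map
      (fun i => PySem.Str.join " · " (PySem.List.slice (pvLinks assets) (some i) (some (i + 3)))))
    = pvRender (pvLinks assets)
  unfold pvRender
  congr 1
  rw [pyRange_three, List.map_map]
  apply List.map_congr_left
  intro k _
  simp only [Function.comp]
  congr 1
  have h1 : (3 * (k : Int)) = ((3 * k : Nat) : Int) := by push_cast; ring
  rw [h1]
  simpa using PySem.List.slice_natCast_add (pvLinks assets) (3 * k) 3

-- B's fold appends pvTail to the accumulator
lemma foldB (assets : List (String × Option String)) : ∀ (out : String) (c : Nat),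
    assets.foldl (fun (st : String × Nat) kv =>
      let value := pvRewrite kv.2
      match value with
      | none => st
      | some v =>
        if v = "" ∨ kv.1 = "composite" then st
        else
          let out := if st.2 ≠ 0 then st.1 ++ (if st.2 % 3 = 0 then "\n" else " · ") else st.1
          (out ++ "[" ++ kv.1 ++ "](" ++ v ++ ")", st.2 + 1)) (out, c)
    = (out ++ pvTail c (pvLinks assets), c + (pvLinks assets).length) := by
  intro out c
  induction assets generalizing out c with
  | nil => simp [pvLinks, pvTail]
  | cons kv rest ih =>
    cases hv : pvRewrite kv.2 with
    | none =>
      simp only [List.foldl_cons, hv]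
      rw [ih]
      simp [pvLinks, hv]
    | some v =>
      by_cases hskip : v = "" ∨ kv.1 = "composite"
      · simp only [List.foldl_cons, hv, if_pos hskip]
        rw [ih]
        have hl : pvLinks (kv :: rest) = pvLinks rest := by
          rcases hskip with hh | hh <;> simp [pvLinks, hv, hh]
        rw [hl]
      · have hv1 : v ≠ "" := fun hx => hskip (Or.inl hx)
        have hv2 : kv.1 ≠ "composite" := fun hx => hskip (Or.inr hx)
        simp only [List.foldl_cons, hv, if_neg hskip]
        rw [ih]
        have hl : pvLinks (kv :: rest) = ("[" ++ kv.1 ++ "](" ++ v ++ ")") :: pvLinks rest := by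
          simp [pvLinks, hv, hv1, hv2]
        rw [hl]
        refine Prod.ext ?_ (by simp; omega)
        simp only [pvTail]
        apply String.toList_inj.mp
        by_cases hcz : c = 0
        · simp [hcz]
        · simp only [pvSep]
          split_ifs <;> simp

lemma portB_eq_pvTail (assets : List (String × Option String)) :
    generate_assets_links_py_alt assets = pvTail 0 (pvLinks assets) := by
  unfold generate_assets_links_py_alt
  rw [foldB]
  apply String.toList_inj.mp
  simp

-- ===== VERDICT (by name: the statement is the Claim_ definition above) =====
theorem generate_assets_links_py_spec : Claim_equal_generate_assets_links_py := by
  intro assets _ _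
  unfold Spec_generate_assets_links_py
  rw [portA_eq_pvRender, portB_eq_pvTail, pvRender_eq_pvTail]
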